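-- pv_equiv track=rewrite | github.com/ComDec/SPOT-RNA-Repro | repro/training_utils.py | multiplets_pairs
-- ===== SOURCE A (Python) =====
-- from collections import Counter, defaultdict
--
-- def flatten_pairs(pairs):
--     flattened = []
--     for pair in pairs:
--         flattened.extend(pair)
--     return flattened
--
-- def multiplets_pairs(pred_pairs):
--     counts = Counter(flatten_pairs(pred_pairs))
--     duplicates = {idx for idx, count in counts.items() if count > 1}
--     grouped = defaultdict(list)
--     for pair in pred_pairs:
--         left, right = pair
--         if left in duplicates:
--             grouped[left].append(pair)
--         if right in duplicates and right != left:
--             grouped[right].append(pair)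
--     return list(grouped.values())
-- ===== SOURCE B (Python) =====
-- def multiplets_pairs(pred_pairs):
--     flat = [idx for pair in pred_pairs for idx in pair]
--     seen = []
--     for idx in flat:
--         if idx not in seen and flat.count(idx) > 1:
--             seen.append(idx)
--     return [[pair for pair in pred_pairs if idx in pair] for idx in seen]
-- ===== Notes on version B (the rewrite author's own statement) =====
-- stated objective: simpler
-- what changed: B drops all dictionaries and sets: it derives the key order directly from the flattened index stream (first occurrence of each over-used index) and builds each group by a fresh scan of pred_pairs, instead of A's Counter + duplicates-set + incremental defaultdict grouping.
import Mathlib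
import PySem

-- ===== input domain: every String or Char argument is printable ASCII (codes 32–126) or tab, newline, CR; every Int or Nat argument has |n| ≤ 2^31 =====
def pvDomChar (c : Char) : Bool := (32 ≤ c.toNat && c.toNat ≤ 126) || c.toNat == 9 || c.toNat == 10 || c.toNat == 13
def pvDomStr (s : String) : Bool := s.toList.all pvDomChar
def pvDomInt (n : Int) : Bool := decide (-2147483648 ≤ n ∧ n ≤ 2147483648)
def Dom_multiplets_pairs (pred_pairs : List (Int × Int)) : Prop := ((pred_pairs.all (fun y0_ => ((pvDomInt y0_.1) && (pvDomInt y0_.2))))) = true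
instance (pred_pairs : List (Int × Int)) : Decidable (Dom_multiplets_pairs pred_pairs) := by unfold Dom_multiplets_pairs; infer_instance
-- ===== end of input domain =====

-- B drops all dictionaries and sets: it reads the multiplet keys off the flattened index
-- stream (first occurrence of each index occurring more than once) and builds each group by
-- a fresh scan of pred_pairs (objective: simpler).

-- ===== PORT A =====
def flatten_pairs (pairs : List (Int × Int)) : List Int :=
  pairs.foldl (fun flattened pair => flattened ++ [pair.1, pair.2]) []

def multiplets_pairs (pred_pairs : List (Int × Int)) : List (List (Int × Int)) :=
  let counts := PySem.Dict.counter (flatten_pairs pred_pairs)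
  let duplicates : PySem.Set Int :=
    PySem.Set.ofList ((counts.items.filter (fun kc : Int × Int => decide (1 < kc.2))).map (fun kc : Int × Int => kc.1))
  let grouped := pred_pairs.foldl (fun (g : PySem.Dict Int (List (Int × Int))) pair =>
      let g := if pair.1 ∈ duplicates then g.modify pair.1 [] (fun v => v ++ [pair]) else g
      if pair.2 ∈ duplicates ∧ pair.2 ≠ pair.1 then g.modify pair.2 [] (fun v => v ++ [pair]) else g)
    PySem.Dict.empty
  grouped.values

-- ===== PORT B =====
def multiplets_pairs_alt (pred_pairs : List (Int × Int)) : List (List (Int × Int)) :=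
  let flat := pred_pairs.flatMap (fun pair => [pair.1, pair.2])
  let seen := flat.foldl (fun seen idx =>
      if idx ∉ seen ∧ 1 < flat.count idx then seen ++ [idx] else seen) []
  seen.map (fun idx => pred_pairs.filter (fun pair => idx == pair.1 || idx == pair.2))

-- ===== PRECONDITION & SPEC =====
def Spec_multiplets_pairs (pred_pairs : List (Int × Int)) (out : List (List (Int × Int))) : Prop := out = multiplets_pairs_alt pred_pairs
instance (pred_pairs : List (Int × Int)) (out : List (List (Int × Int))) : Decidable (Spec_multiplets_pairs pred_pairs out) := by unfold Spec_multiplets_pairs; infer_instance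

-- ===== CLAIM (what is proved, stated in full; the proofs are below) =====
def Claim_equal_multiplets_pairs : Prop := ∀ (pred_pairs : List (Int × Int)), Dom_multiplets_pairs pred_pairs → Spec_multiplets_pairs pred_pairs (multiplets_pairs pred_pairs)

-- ===== LEMMAS AND PROOFS =====

-- named form of A's grouping-loop body
def stepA (dups : List Int) (g : PySem.Dict Int (List (Int × Int))) (pair : Int × Int) :
    PySem.Dict Int (List (Int × Int)) :=
  let g := if pair.1 ∈ dups then g.modify pair.1 [] (fun v => v ++ [pair]) else g
  if pair.2 ∈ dups ∧ pair.2 ≠ pair.1 then g.modify pair.2 [] (fun v => v ++ [pair]) else g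

-- A's duplicates set, named
def dupsOf (l : List (Int × Int)) : List Int :=
  PySem.Set.ofList
    (((PySem.Dict.counter (flatten_pairs l)).items.filter
        (fun kc : Int × Int => decide (1 < kc.2))).map (fun kc : Int × Int => kc.1))

-- named forms of B's pieces
def flatP (l : List (Int × Int)) : List Int := l.flatMap (fun p => [p.1, p.2])

def seenStep (dups : List Int) (s : List Int) (i : Int) : List Int :=
  if i ∉ s ∧ i ∈ dups then s ++ [i] else s

def grp (l : List (Int × Int)) (k : Int) : List (Int × Int) :=
  l.filter (fun q => k == q.1 || k == q.2)

theorem mem_foldl_seenStep (dups fl : List Int) (s : List Int) (x : Int) :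
    x ∈ fl.foldl (seenStep dups) s ↔ x ∈ s ∨ (x ∈ fl ∧ x ∈ dups) := by
  induction fl generalizing s with
  | nil => simp
  | cons i t ih =>
    rw [List.foldl_cons, ih]
    unfold seenStep
    by_cases hi : i ∉ s ∧ i ∈ dups
    · rw [if_pos hi]
      simp only [List.mem_append, List.mem_cons, List.not_mem_nil, or_false]
      constructor
      · rintro (⟨h | rfl⟩ | h)
        · exact Or.inl h
        · exact Or.inr ⟨Or.inl rfl, hi.2⟩
        · exact Or.inr ⟨Or.inr h.1, h.2⟩
      · rintro (h | ⟨rfl | h, hd⟩)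
        · exact Or.inl (Or.inl h)
        · exact Or.inl (Or.inr rfl)
        · exact Or.inr ⟨h, hd⟩
    · rw [if_neg hi]
      rw [Classical.not_and_iff_not_or_not, not_not] at hi
      constructor
      · rintro (h | h)
        · exact Or.inl h
        · exact Or.inr ⟨List.mem_cons_of_mem _ h.1, h.2⟩
      · rintro (h | ⟨hm, hd⟩)
        · exact Or.inl h
        · rcases List.mem_cons.1 hm with rfl | hm
          · rcases hi with h' | h'
            · exact Or.inl h'
            · exact absurd hd h'
          · exact Or.inr ⟨hm, hd⟩

theorem find?_map_keyed (K : List Int) (G : Int → List (Int × Int)) (a : Int) :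
    (K.map (fun k => (k, G k))).find? (fun q => q.1 == a)
      = if a ∈ K then some (a, G a) else none := by
  induction K with
  | nil => rfl
  | cons k t ih =>
    by_cases hk : k = a
    · subst hk; simp
    · have hb : (k == a) = false := by simpa using hk
      simp [hb, ih, List.mem_cons, Ne.symm hk]

theorem any_map_keyed (K : List Int) (G : Int → List (Int × Int)) (a : Int) :
    (K.map (fun k => (k, G k))).any (fun q => q.1 == a) = decide (a ∈ K) := by
  induction K with
  | nil => rfl
  | cons k t ih =>
    by_cases hk : k = a
    · subst hk; simp
    · simp [ih, hk, Ne.symm hk]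

theorem items_modify_keyed (g : PySem.Dict Int (List (Int × Int))) (K : List Int)
    (G : Int → List (Int × Int)) (p : Int × Int) (a : Int)
    (hg : g.items = K.map (fun k => (k, G k)))
    (hnew : a ∉ K → G a = []) :
    (g.modify a [] (fun v => v ++ [p])).items
      = (if a ∈ K then K else K ++ [a]).map (fun k => (k, if k = a then G a ++ [p] else G k)) := by
  have hmod : g.modify a [] (fun v => v ++ [p]) = g.insert a (g.getD a [] ++ [p]) := by
    simp [PySem.Dict.modify]
  have hcont : g.contains a = decide (a ∈ K) := by
    have h1 : g.contains a = g.items.any (fun q => q.1 == a) := by simp [PySem.Dict.contains]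
    rw [h1, hg, any_map_keyed]
  have hget : g.get? a = if a ∈ K then some (G a) else none := by
    have h1 : g.get? a = (g.items.find? (fun q => q.1 == a)).map Prod.snd := by
      simp [PySem.Dict.get?]
    rw [h1, hg, find?_map_keyed]
    by_cases h : a ∈ K <;> simp [h]
  rw [hmod, PySem.Dict.items_insert, hcont]
  by_cases hK : a ∈ K
  · have hgd : g.getD a [] = G a := by
      rw [PySem.Dict.getD_eq_get?_getD, hget]; simp [hK]
    rw [if_pos (by simp [hK]), if_pos hK, hg, hgd, List.map_map]
    apply List.map_congr_left
    intro k _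
    by_cases hk : k = a
    · subst hk; simp
    · simp [hk]
  · have hgd : g.getD a [] = [] := by
      rw [PySem.Dict.getD_eq_get?_getD, hget]; simp [hK]
    rw [if_neg (by simp [hK]), if_neg hK, hg, hgd, hnew hK, List.map_append]
    congr 1
    · apply List.map_congr_left
      intro k hkK
      have hk : ¬ k = a := fun h => hK (h ▸ hkK)
      simp [hk]
    · simp

theorem grp_nil_of_not_mem_flat (l : List (Int × Int)) (k : Int) (h : k ∉ flatP l) :
    grp l k = [] := by
  rw [grp, List.filter_eq_nil_iff]
  intro q hq
  simp only [Bool.or_eq_true, beq_iff_eq, not_or]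
  constructor <;> rintro rfl <;>
    exact h (List.mem_flatMap.2 ⟨q, hq, by simp⟩)

theorem grp_append (l : List (Int × Int)) (p : Int × Int) (k : Int) :
    grp (l ++ [p]) k = grp l k ++ (if k == p.1 || k == p.2 then [p] else []) := by
  rw [grp, grp, List.filter_append]
  congr 1
  by_cases h : (k == p.1 || k == p.2) = true <;> simp [List.filter, h]

theorem mem_seenStep_of_mem (dups s : List Int) (i x : Int) (h : x ∈ s) :
    x ∈ seenStep dups s i := by
  unfold seenStep; split <;> simp [h]

theorem mem_seenStep_self (dups s : List Int) (i : Int) (h : i ∈ dups) :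
    i ∈ seenStep dups s i := by
  unfold seenStep; split
  · simp
  · rename_i hc
    rw [Classical.not_and_iff_not_or_not, not_not] at hc
    rcases hc with h' | h'
    · exact h'
    · exact absurd h h'

theorem mem_seenStep_dups (dups s : List Int) (i x : Int) (hs : ∀ k ∈ s, k ∈ dups)
    (h : x ∈ seenStep dups s i) : x ∈ dups := by
  unfold seenStep at h; split at h
  · rename_i hc
    rcases List.mem_append.1 h with h' | h'
    · exact hs x h'
    · rw [List.mem_singleton] at h'; exact h' ▸ hc.2
  · exact hs x h

-- flatten_pairs is the flat-map of the pair components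
theorem flatten_pairs_eq (l : List (Int × Int)) : flatten_pairs l = flatP l := by
  simpa [flatten_pairs, flatP] using
    PySem.List.foldl_append_eq_flatMap (fun p : Int × Int => [p.1, p.2]) l []

-- membership in A's duplicates set is "counted more than once in the flattened list"
theorem mem_dupsOf (l : List (Int × Int)) (x : Int) :
    x ∈ dupsOf l ↔ 1 < (flatten_pairs l).count x := by
  unfold dupsOf
  rw [PySem.Set.mem_ofList, PySem.Dict.items_counter]
  constructor
  · intro h
    simp only [List.mem_map, List.mem_filter, decide_eq_true_eq] at h
    obtain ⟨kc, ⟨hmem, hc⟩, rfl⟩ := h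
    obtain ⟨k, -, rfl⟩ := hmem
    simp only at hc ⊢
    exact_mod_cast hc
  · intro h
    refine List.mem_map.2 ⟨(x, ((flatten_pairs l).count x : Int)), List.mem_filter.2 ⟨?_, ?_⟩, rfl⟩
    · exact List.mem_map.2 ⟨x, (PySem.Set.mem_ofList _ _).2 (List.count_pos_iff.1 (by omega)), rfl⟩
    · simp only [decide_eq_true_eq]
      exact_mod_cast h

-- MAIN INVARIANT: A's grouping fold has exactly B's keys-to-groups shape
theorem invA (dups : List Int) (l : List (Int × Int)) :
    (l.foldl (stepA dups) PySem.Dict.empty).items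
      = ((flatP l).foldl (seenStep dups) []).map (fun k => (k, grp l k)) := by
  induction l using List.reverseRecOn with
  | nil => simp [flatP, PySem.Dict.empty]
  | append_singleton l p ih =>
    set K := (flatP l).foldl (seenStep dups) [] with hK
    have hKmem : ∀ k ∈ K, k ∈ dups := by
      intro k hk
      rcases (mem_foldl_seenStep dups (flatP l) [] k).1 hk with h | h
      · simp at h
      · exact h.2
    have hKflat : ∀ k, k ∈ dups → k ∉ K → grp l k = [] := by
      intro k hd hnk
      refine grp_nil_of_not_mem_flat l k (fun hf => hnk ?_)
      exact (mem_foldl_seenStep dups (flatP l) [] k).2 (Or.inr ⟨hf, hd⟩)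
    have hkeys : (flatP (l ++ [p])).foldl (seenStep dups) []
        = seenStep dups (seenStep dups K p.1) p.2 := by
      rw [show flatP (l ++ [p]) = flatP l ++ [p.1, p.2] by simp [flatP], List.foldl_append]; rfl
    rw [List.foldl_append, List.foldl_cons, List.foldl_nil, hkeys]
    set G := grp l with hG
    set gl := l.foldl (stepA dups) PySem.Dict.empty with hgl
    set G1 : Int → List (Int × Int) := fun k => if k = p.1 ∧ p.1 ∈ dups then G k ++ [p] else G k with hG1
    set K1 := seenStep dups K p.1 with hK1
    have hK1mem : ∀ k ∈ K1, k ∈ dups := fun k hk => mem_seenStep_dups dups K p.1 k hKmem hk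
    have h1 : (if p.1 ∈ dups then gl.modify p.1 [] (fun v => v ++ [p]) else gl).items
        = K1.map (fun k => (k, G1 k)) := by
      by_cases hd : p.1 ∈ dups
      · rw [if_pos hd, items_modify_keyed gl K G p p.1 ih (fun h => hKflat p.1 hd h), hK1]
        unfold seenStep
        by_cases hm : p.1 ∈ K
        · rw [if_pos hm, if_neg (by simp [hm])]
          apply List.map_congr_left; intro k _
          by_cases hk : k = p.1 <;> simp [hG1, hk, hd]
        · rw [if_neg hm, if_pos (And.intro hm hd)]
          apply List.map_congr_left; intro k _
          by_cases hk : k = p.1 <;> simp [hG1, hk, hd]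
      · rw [if_neg hd, ih, hK1]
        unfold seenStep
        rw [if_neg (by simp [hd])]
        apply List.map_congr_left; intro k _
        simp [hG1, hd]
    show (stepA dups gl p).items = _
    unfold stepA
    simp only []
    by_cases hc : p.2 ∈ dups ∧ p.2 ≠ p.1
    · rw [if_pos hc]
      have hnew1 : p.2 ∉ K1 → G1 p.2 = [] := by
        intro h
        have hm2 : p.2 ∉ K := fun hk => h (mem_seenStep_of_mem dups K p.1 p.2 hk)
        have : G1 p.2 = G p.2 := by rw [hG1]; simp [hc.2]
        rw [this]
        exact hKflat p.2 hc.1 hm2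
      rw [items_modify_keyed _ K1 G1 p p.2 h1 hnew1]
      unfold seenStep
      by_cases hm2 : p.2 ∈ K1
      · rw [if_pos hm2, if_neg (by simp [hm2])]
        apply List.map_congr_left; intro k hk
        have hkd : k ∈ dups := hK1mem k hk
        rw [grp_append]
        by_cases hk2 : k = p.2
        · subst hk2
          simp [hG1, hG, hc.2]
        · by_cases hk1 : k = p.1
          · subst hk1; simp [hG1, hG, hk2, hkd]
          · simp [hG1, hG, hk1, hk2]
      · rw [if_neg hm2, if_pos (And.intro hm2 hc.1)]
        apply List.map_congr_left; intro k hk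
        rcases List.mem_append.1 hk with hk | hk
        · have hkd : k ∈ dups := hK1mem k hk
          have hk2 : ¬ k = p.2 := fun h => hm2 (h ▸ hk)
          rw [grp_append]
          by_cases hk1 : k = p.1
          · subst hk1; simp [hG1, hG, hk2, hkd]
          · simp [hG1, hG, hk1, hk2]
        · rw [List.mem_singleton] at hk; subst hk
          rw [grp_append]
          have hGe : grp l p.2 = [] :=
            hKflat p.2 hc.1 (fun h => hm2 (mem_seenStep_of_mem dups K p.1 p.2 h))
          simp [hG1, hG, hc.2, hGe]
    · rw [if_neg hc, h1]
      rw [Classical.not_and_iff_not_or_not, not_not] at hc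
      have hK2 : seenStep dups K1 p.2 = K1 := by
        unfold seenStep
        rw [if_neg ?_]
        rw [Classical.not_and_iff_not_or_not, not_not]
        rcases hc with h' | h'
        · exact Or.inr h'
        · by_cases hd1 : p.1 ∈ dups
          · exact Or.inl (by rw [h']; exact mem_seenStep_self dups K p.1 hd1)
          · exact Or.inr (by rw [h']; exact hd1)
      rw [hK2]
      apply List.map_congr_left; intro k hk
      have hkd : k ∈ dups := hK1mem k hk
      rw [grp_append]
      by_cases hk1 : k = p.1
      · subst hk1; simp [hG1, hG, hkd]
      · have hk2 : ¬ k = p.2 := by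
          rcases hc with h' | h'
          · exact fun h => h' (h ▸ hkd)
          · exact fun h => hk1 (h.trans h')
        simp [hG1, hG, hk1, hk2]

-- ===== VERDICT (by name: the statement is the Claim_ definition above) =====
theorem multiplets_pairs_spec : Claim_equal_multiplets_pairs := by
  intro pred_pairs _
  unfold Spec_multiplets_pairs
  have hA : multiplets_pairs pred_pairs
      = (pred_pairs.foldl (stepA (dupsOf pred_pairs)) PySem.Dict.empty).items.map Prod.snd := rfl
  have hfun : (fun (s : List Int) idx =>
        if idx ∉ s ∧ 1 < (pred_pairs.flatMap (fun pair => [pair.1, pair.2])).count idx then s ++ [idx] else s)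
      = seenStep (dupsOf pred_pairs) := by
    funext s i
    unfold seenStep
    refine if_congr (and_congr Iff.rfl ?_) rfl rfl
    rw [show pred_pairs.flatMap (fun pair => [pair.1, pair.2]) = flatten_pairs pred_pairs from (flatten_pairs_eq pred_pairs).symm]
    exact (mem_dupsOf pred_pairs i).symm
  have hB : multiplets_pairs_alt pred_pairs
      = ((flatP pred_pairs).foldl (seenStep (dupsOf pred_pairs)) []).map (grp pred_pairs) := by
    show ((flatP pred_pairs).foldl _ []).map _ = _
    rw [hfun]
    rfl
  rw [hA, hB, invA, List.map_map]
  rfl
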